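-- pv_equiv track=rewrite | github.com/Klohger/BayerMatrix | MakeBayer.py | MakeBayer
-- ===== SOURCE A (Python) =====
-- Matrix = list[list[int]]
--
-- def MakeBayer(
--     size: int = 16,
--     x: int = 0,
--     y: int = 0,
--     value: int = 0,
--     step: int = 1,
--     matrix: Matrix | None = None,
-- ):
--     if matrix is None:
--         matrix = [[0 for _ in range(size)] for _ in range(size)]
--
--     if size == 1:
--         matrix[y][x] = value
--         return matrix
--
--     half = size // 2
--     # fmt: off
--     # Subdivide into four recursively until size is 1.
--     MakeBayer(size=half,     x=x,          y=y,         value=value + (step * 0),   step=step * 4, matrix=matrix)   # Top Left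
--     MakeBayer(size=half,     x=x + half,   y=y + half,  value=value + (step * 1),   step=step * 4, matrix=matrix)   # Bottom Right
--     MakeBayer(size=half,     x=x + half,   y=y,         value=value + (step * 2),   step=step * 4, matrix=matrix)   # Top Right
--     MakeBayer(size=half,     x=x,          y=y + half,  value=value + (step * 3),   step=step * 4, matrix=matrix)   # Bottom Left
--     # fmt: on
--     return matrix
-- ===== SOURCE B (Python) =====
-- # Iterative re-implementation: the four recursive subdivisions are replaced by an
-- # explicit LIFO work stack (pushed so that pop order matches A's call order).
-- # Like A, it mutates a caller-supplied matrix in place.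
-- def MakeBayer(
--     size: int = 16,
--     x: int = 0,
--     y: int = 0,
--     value: int = 0,
--     step: int = 1,
--     matrix=None,
-- ):
--     if matrix is None:
--         matrix = [[0 for _ in range(size)] for _ in range(size)]
--     stack = [(size, x, y, value, step)]
--     while stack:
--         s, sx, sy, v, st = stack.pop()
--         if s == 1:
--             matrix[sy][sx] = v
--             continue
--         half = s // 2
--         # pushed in reverse so Top Left is processed first, as in the recursion
--         stack.append((half, sx,        sy + half, v + st * 3, st * 4))  # Bottom Left
--         stack.append((half, sx + half, sy,        v + st * 2, st * 4))  # Top Right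
--         stack.append((half, sx + half, sy + half, v + st * 1, st * 4))  # Bottom Right
--         stack.append((half, sx,        sy,        v + st * 0, st * 4))  # Top Left
--     return matrix
-- ===== Notes on version B (the rewrite author's own statement) =====
-- stated objective: alternative
-- what changed: The four recursive subdivision calls are replaced by an iterative while-loop over an explicit LIFO work stack (pushed in reverse so pop order matches A's call order), eliminating recursion entirely.
import Mathlib
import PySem

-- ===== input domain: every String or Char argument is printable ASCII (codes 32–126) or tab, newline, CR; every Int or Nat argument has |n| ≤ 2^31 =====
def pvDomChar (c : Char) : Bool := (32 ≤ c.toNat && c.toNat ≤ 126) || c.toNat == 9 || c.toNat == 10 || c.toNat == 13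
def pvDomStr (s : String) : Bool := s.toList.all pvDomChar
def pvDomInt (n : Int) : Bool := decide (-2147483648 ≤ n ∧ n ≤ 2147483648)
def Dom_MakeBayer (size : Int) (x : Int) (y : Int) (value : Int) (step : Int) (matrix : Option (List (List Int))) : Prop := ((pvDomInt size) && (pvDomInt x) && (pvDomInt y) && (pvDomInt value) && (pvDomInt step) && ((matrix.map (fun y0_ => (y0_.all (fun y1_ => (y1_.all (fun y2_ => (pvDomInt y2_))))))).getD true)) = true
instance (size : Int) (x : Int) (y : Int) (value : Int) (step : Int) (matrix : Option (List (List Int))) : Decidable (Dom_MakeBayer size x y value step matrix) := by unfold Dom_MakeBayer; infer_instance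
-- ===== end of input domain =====

-- B replaces A's four recursive subdivision calls by an explicit LIFO work stack (same write
-- order); both versions mutate a caller-supplied matrix in place, equivalence is about the
-- returned value.

-- ===== PORT A =====
-- shared helper: `matrix is None` default initialization (identical line in both Pythons)
def mbInit (size : Int) (matrix : Option (List (List Int))) : List (List Int) :=
  match matrix with
  | none => List.replicate size.toNat (List.replicate size.toNat 0)
  | some m => m

-- shared helper: `matrix[y][x] = value` with Python index semantics (out-of-range leaves the
-- matrix unchanged; Python raises there — excluded by Pre_)
def mbSet (m : List (List Int)) (y x v : Int) : List (List Int) :=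
  PySem.List.pySetD m y (PySem.List.pySetD (PySem.List.pyGetD m y []) x v)

-- A's recursion, with a fuel argument as a pure totality guard: `size.toNat` fuel (see MakeBayer)
-- always outlasts the halving depth when 1 ≤ size; fuel 0 is unreachable there (Python recurses
-- forever on size ≤ 0 — outside Pre_).
def mbRec : Nat → Int → Int → Int → Int → Int → List (List Int) → List (List Int)
  | 0, _, _, _, _, _, m => m
  | fuel + 1, size, x, y, value, step, m =>
    if size = 1 then mbSet m y x value
    else if size ≤ 1 then m
    else
      let half := PySem.Int.floordiv size 2
      let m1 := mbRec fuel half x          y          (value + step * 0) (step * 4) m   -- Top Left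
      let m2 := mbRec fuel half (x + half) (y + half) (value + step * 1) (step * 4) m1  -- Bottom Right
      let m3 := mbRec fuel half (x + half) y          (value + step * 2) (step * 4) m2  -- Top Right
      mbRec fuel half x (y + half) (value + step * 3) (step * 4) m3                     -- Bottom Left

def MakeBayer (size : Int) (x : Int) (y : Int) (value : Int) (step : Int) (matrix : Option (List (List Int))) : List (List Int) :=
  mbRec size.toNat size x y value step (mbInit size matrix)

-- ===== PORT B =====
-- B's while-loop over the explicit work stack, with a fuel argument as a pure totality guard:
-- 2·size² fuel (see MakeBayer_alt) always outlasts the number of loop iterations when 1 ≤ size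
-- (Python B loops forever on a seed with size ≤ 0 — outside Pre_).
def mbLoop : Nat → List (Int × Int × Int × Int × Int) → List (List Int) → List (List Int)
  | 0, _, m => m
  | _ + 1, [], m => m
  | fuel + 1, (s, sx, sy, v, st) :: rest, m =>
    if s = 1 then mbLoop fuel rest (mbSet m sy sx v)
    else if s ≤ 1 then mbLoop fuel rest m
    else
      let half := PySem.Int.floordiv s 2
      -- pushed in reverse so Top Left is popped (= head) first, as in A's recursion
      mbLoop fuel ((half, sx,        sy,        v + st * 0, st * 4) ::
                   (half, sx + half, sy + half, v + st * 1, st * 4) ::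
                   (half, sx + half, sy,        v + st * 2, st * 4) ::
                   (half, sx,        sy + half, v + st * 3, st * 4) :: rest) m

def MakeBayer_alt (size : Int) (x : Int) (y : Int) (value : Int) (step : Int) (matrix : Option (List (List Int))) : List (List Int) :=
  mbLoop (2 * (size.toNat * size.toNat)) [(size, x, y, value, step)] (mbInit size matrix)

-- ===== PRECONDITION & SPEC =====
-- Pre_ requires size ≥ 1 (A recurses forever on size ≤ 0) and that x..x+E and y..y+E, with
-- E = size − popcount(size) the exact maximal offset the subdivision writes, are Python-valid
-- indices in every row; on ragged matrices rows the recursion never reaches are still required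
-- to be long enough, so a few inputs on which A returns (and agrees with B) are excluded; see cite.
def Pre_MakeBayer (size : Int) (x : Int) (y : Int) (value : Int) (step : Int) (matrix : Option (List (List Int))) : Prop :=
  1 ≤ size ∧
  (matrix.isNone = true → -size ≤ x ∧ x + (size - (PySem.Int.bitCount size : Int)) < size ∧
    -size ≤ y ∧ y + (size - (PySem.Int.bitCount size : Int)) < size) ∧
  ∀ m ∈ matrix.toList, -(m.length : Int) ≤ y ∧ y + (size - (PySem.Int.bitCount size : Int)) < (m.length : Int) ∧
    ∀ r ∈ m, -(r.length : Int) ≤ x ∧ x + (size - (PySem.Int.bitCount size : Int)) < (r.length : Int)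
instance (size : Int) (x : Int) (y : Int) (value : Int) (step : Int) (matrix : Option (List (List Int))) : Decidable (Pre_MakeBayer size x y value step matrix) := by
  unfold Pre_MakeBayer; infer_instance

def pvWitness_MakeBayer : Int × Int × Int × Int × Int × Option (List (List Int)) := (2, 0, 0, 0, 1, none)

def Spec_MakeBayer (size : Int) (x : Int) (y : Int) (value : Int) (step : Int) (matrix : Option (List (List Int))) (out : List (List Int)) : Prop := out = MakeBayer_alt size x y value step matrix
instance (size : Int) (x : Int) (y : Int) (value : Int) (step : Int) (matrix : Option (List (List Int))) (out : List (List Int)) : Decidable (Spec_MakeBayer size x y value step matrix out) := by unfold Spec_MakeBayer; infer_instance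

-- ===== CLAIM (what is proved, stated in full; the proofs are below) =====
def Claim_equal_MakeBayer : Prop := ∀ (size : Int) (x : Int) (y : Int) (value : Int) (step : Int) (matrix : Option (List (List Int))), Dom_MakeBayer size x y value step matrix → Pre_MakeBayer size x y value step matrix → Spec_MakeBayer size x y value step matrix (MakeBayer size x y value step matrix)

-- ===== LEMMAS AND PROOFS =====
-- weight of one work item = number of loop iterations B spends on it (used only in proofs)
def mbWt (s : Int) : Nat :=
  if s ≤ 1 then 1 else 1 + 4 * mbWt (PySem.Int.floordiv s 2)
termination_by s.toNat
decreasing_by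
  rw [PySem.Int.floordiv_eq_ediv_of_pos (by omega : (0:Int) < 2)]
  omega

theorem mbWt_one : mbWt 1 = 1 := by rw [mbWt]; simp

theorem mbWt_of_gt {s : Int} (h : ¬ s ≤ 1) :
    mbWt s = 1 + 4 * mbWt (PySem.Int.floordiv s 2) := by
  rw [mbWt]; simp [h]

theorem half_facts {s : Int} (h : ¬ s ≤ 1) :
    1 ≤ PySem.Int.floordiv s 2 ∧ (PySem.Int.floordiv s 2).toNat < s.toNat := by
  rw [PySem.Int.floordiv_eq_ediv_of_pos (by omega : (0:Int) < 2)]; omega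

theorem mbWt_le (s : Int) (hs : 1 ≤ s) : mbWt s + 1 ≤ 2 * (s.toNat * s.toNat) := by
  by_cases h1 : s ≤ 1
  · have he : s = 1 := le_antisymm h1 hs
    subst he; rw [mbWt_one]; norm_num
  · have hh := half_facts h1
    have ih := mbWt_le (PySem.Int.floordiv s 2) hh.1
    rw [mbWt_of_gt h1]
    have h2 : 2 * (PySem.Int.floordiv s 2).toNat ≤ s.toNat := by
      rw [PySem.Int.floordiv_eq_ediv_of_pos (by omega : (0:Int) < 2)] at hh ⊢; omega
    have h3 : (2 * (PySem.Int.floordiv s 2).toNat) * (2 * (PySem.Int.floordiv s 2).toNat)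
        ≤ s.toNat * s.toNat := Nat.mul_le_mul h2 h2
    nlinarith [h3, ih]
termination_by s.toNat
decreasing_by exact (half_facts h1).2

-- A's result does not depend on the fuel once it covers the halving depth
theorem mbRec_fuel (s x y v st : Int) (m : List (List Int)) (f g : Nat)
    (hs : 1 ≤ s) (hf : s.toNat ≤ f) (hg : s.toNat ≤ g) :
    mbRec f s x y v st m = mbRec g s x y v st m := by
  obtain ⟨f', rfl⟩ : ∃ f', f = f' + 1 := ⟨f - 1, by omega⟩
  obtain ⟨g', rfl⟩ : ∃ g', g = g' + 1 := ⟨g - 1, by omega⟩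
  by_cases h1 : s = 1
  · simp [mbRec, h1]
  · by_cases hle : s ≤ 1
    · simp [mbRec, h1, hle]
    · have hh := half_facts hle
      have hf' : (PySem.Int.floordiv s 2).toNat ≤ f' := by omega
      have hg' : (PySem.Int.floordiv s 2).toNat ≤ g' := by omega
      simp only [mbRec, h1, hle, if_false]
      rw [mbRec_fuel _ _ _ _ _ _ f' g' hh.1 hf' hg',
          mbRec_fuel _ _ _ _ _ _ f' g' hh.1 hf' hg',
          mbRec_fuel _ _ _ _ _ _ f' g' hh.1 hf' hg',
          mbRec_fuel _ _ _ _ _ _ f' g' hh.1 hf' hg']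
termination_by s.toNat
decreasing_by all_goals exact (half_facts hle).2

-- Processing one work item on top of the stack = running A's recursion on it, then the rest.
theorem mbLoop_step (s sx sy v st : Int) (rest : List (Int × Int × Int × Int × Int))
    (m : List (List Int)) (fL : Nat) (hs : 1 ≤ s) :
    mbLoop (fL + mbWt s) ((s, sx, sy, v, st) :: rest) m
      = mbLoop fL rest (mbRec s.toNat s sx sy v st m) := by
  obtain ⟨k, hk⟩ : ∃ k, s.toNat = k + 1 := ⟨s.toNat - 1, by omega⟩
  by_cases h1 : s = 1
  · subst h1
    rw [mbWt_one]
    simp [mbLoop, mbRec]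
  · have hle : ¬ s ≤ 1 := by omega
    have hh := half_facts hle
    have hwle : (PySem.Int.floordiv s 2).toNat ≤ k := by omega
    rw [mbWt_of_gt hle]
    have e1 : fL + (1 + 4 * mbWt (PySem.Int.floordiv s 2))
        = (fL + 4 * mbWt (PySem.Int.floordiv s 2)) + 1 := by ring
    rw [e1]
    simp only [mbLoop, h1, hle, if_false]
    have e2 : fL + 4 * mbWt (PySem.Int.floordiv s 2)
        = (fL + 3 * mbWt (PySem.Int.floordiv s 2)) + mbWt (PySem.Int.floordiv s 2) := by ring
    rw [e2, mbLoop_step _ _ _ _ _ _ _ _ hh.1]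
    have e3 : fL + 3 * mbWt (PySem.Int.floordiv s 2)
        = (fL + 2 * mbWt (PySem.Int.floordiv s 2)) + mbWt (PySem.Int.floordiv s 2) := by ring
    rw [e3, mbLoop_step _ _ _ _ _ _ _ _ hh.1]
    have e4 : fL + 2 * mbWt (PySem.Int.floordiv s 2)
        = (fL + 1 * mbWt (PySem.Int.floordiv s 2)) + mbWt (PySem.Int.floordiv s 2) := by ring
    rw [e4, mbLoop_step _ _ _ _ _ _ _ _ hh.1]
    have e5 : fL + 1 * mbWt (PySem.Int.floordiv s 2)
        = fL + mbWt (PySem.Int.floordiv s 2) := by ring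
    rw [e5, mbLoop_step _ _ _ _ _ _ _ _ hh.1]
    rw [hk]
    simp only [mbRec, h1, hle, if_false]
    rw [mbRec_fuel _ _ _ _ _ _ k _ hh.1 hwle (le_refl _),
        mbRec_fuel _ _ _ _ _ _ k _ hh.1 hwle (le_refl _),
        mbRec_fuel _ _ _ _ _ _ k _ hh.1 hwle (le_refl _),
        mbRec_fuel _ _ _ _ _ _ k _ hh.1 hwle (le_refl _)]
termination_by s.toNat
decreasing_by all_goals exact (half_facts hle).2

theorem mbLoop_nil (f : Nat) (m : List (List Int)) : mbLoop f [] m = m := by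
  cases f <;> rfl

-- ===== VERDICT (by name: the statement is the Claim_ definition above) =====
theorem MakeBayer_spec : Claim_equal_MakeBayer := by
  intro size x y value step matrix _ hPre
  unfold Spec_MakeBayer MakeBayer MakeBayer_alt
  have hw := mbWt_le size hPre.1
  have hfuel : 2 * (size.toNat * size.toNat)
      = (2 * (size.toNat * size.toNat) - mbWt size) + mbWt size := by omega
  rw [hfuel, mbLoop_step _ _ _ _ _ _ _ _ hPre.1, mbLoop_nil]
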